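-- pv_equiv track=rewrite | github.com/JiachenTu/tsg_any_gran | visualization/utils.py | extract_verb_dobj
-- ===== SOURCE A (Python) =====
-- from typing import List, Optional, Tuple, Any
--
-- def extract_verb_dobj(triplets: List[List[str]]) -> Tuple[Optional[str], Optional[str]]:
--     """Extract the main verb and direct object from triplets.
--
--     Args:
--         triplets: List of triplets
--
--     Returns:
--         Tuple of (verb, dobj) or (None, None) if not found
--     """
--     verb = None
--     dobj = None
--
--     for triplet in triplets:
--         if len(triplet) == 3:
--             if triplet[1] == 'verb':
--                 verb = triplet[2]
--             elif triplet[1] == 'dobj':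
--                 dobj = triplet[2]
--
--     return verb, dobj
-- ===== SOURCE B (Python) =====
-- from typing import List, Optional, Tuple
--
-- def extract_verb_dobj(triplets: List[List[str]]) -> Tuple[Optional[str], Optional[str]]:
--     """Scan the triplets back-to-front: the first 'verb'/'dobj' hit seen in
--     reverse order is the last one in original order, so we can stop as soon
--     as both slots are filled."""
--     verb = None
--     dobj = None
--     for triplet in reversed(triplets):
--         if len(triplet) == 3:
--             tag = triplet[1]
--             if verb is None and tag == 'verb':
--                 verb = triplet[2]
--             elif dobj is None and tag == 'dobj':
--                 dobj = triplet[2]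
--         if verb is not None and dobj is not None:
--             break
--     return verb, dobj
-- ===== Notes on version B (the rewrite author's own statement) =====
-- stated objective: alternative
-- what changed: B scans the triplets in reverse with an early break once both the last verb and last dobj are found, instead of A's full forward scan that keeps overwriting.
import Mathlib
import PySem

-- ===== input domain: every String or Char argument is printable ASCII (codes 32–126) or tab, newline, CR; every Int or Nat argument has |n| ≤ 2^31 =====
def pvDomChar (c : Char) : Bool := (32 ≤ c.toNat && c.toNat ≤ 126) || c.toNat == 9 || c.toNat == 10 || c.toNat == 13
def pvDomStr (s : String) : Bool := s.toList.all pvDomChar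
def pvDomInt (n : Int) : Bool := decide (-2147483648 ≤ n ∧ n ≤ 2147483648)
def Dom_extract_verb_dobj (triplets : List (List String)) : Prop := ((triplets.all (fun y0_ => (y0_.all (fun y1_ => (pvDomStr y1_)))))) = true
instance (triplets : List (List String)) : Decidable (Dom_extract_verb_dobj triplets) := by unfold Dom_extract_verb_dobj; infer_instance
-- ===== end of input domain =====

-- B scans the triplets in reverse with an early break once both last-verb and last-dobj are found (alternative strategy, same result).


-- ===== PORT A =====
-- one loop step of A: overwrite verb / dobj when a matching length-3 triplet is seen
def pvStepA (acc : Option String × Option String) (t : List String) : Option String × Option String :=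
  if t.length = 3 then
    if PySem.List.pyGet? t 1 = some "verb" then (PySem.List.pyGet? t 2, acc.2)
    else if PySem.List.pyGet? t 1 = some "dobj" then (acc.1, PySem.List.pyGet? t 2)
    else acc
  else acc

def extract_verb_dobj (triplets : List (List String)) : Option String × Option String :=
  triplets.foldl pvStepA (none, none)

-- ===== PORT B =====
-- reverse scan: keep the first hit (in reverse order) for each slot, break when both are filled
def pvGoB : List (List String) → Option String → Option String → Option String × Option String
  | [], verb, dobj => (verb, dobj)
  | t :: rest, verb, dobj =>
    let (verb', dobj') :=
      if t.length = 3 then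
        if verb = none ∧ PySem.List.pyGet? t 1 = some "verb" then (PySem.List.pyGet? t 2, dobj)
        else if dobj = none ∧ PySem.List.pyGet? t 1 = some "dobj" then (verb, PySem.List.pyGet? t 2)
        else (verb, dobj)
      else (verb, dobj)
    if verb' ≠ none ∧ dobj' ≠ none then (verb', dobj') else pvGoB rest verb' dobj'

def extract_verb_dobj_alt (triplets : List (List String)) : Option String × Option String :=
  pvGoB triplets.reverse none none

-- ===== PRECONDITION & SPEC =====
def Spec_extract_verb_dobj (triplets : List (List String)) (out : Option String × Option String) : Prop := out = extract_verb_dobj_alt triplets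
instance (triplets : List (List String)) (out : Option String × Option String) : Decidable (Spec_extract_verb_dobj triplets out) := by unfold Spec_extract_verb_dobj; infer_instance

-- ===== CLAIM (what is proved, stated in full; the proofs are below) =====
def Claim_equal_extract_verb_dobj : Prop := ∀ (triplets : List (List String)), Dom_extract_verb_dobj triplets → Spec_extract_verb_dobj triplets (extract_verb_dobj triplets)

-- ===== LEMMAS AND PROOFS =====
-- extraction of a single triplet's contribution to each slot
def pvGV (t : List String) : Option String :=
  if t.length = 3 ∧ PySem.List.pyGet? t 1 = some "verb" then PySem.List.pyGet? t 2 else none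
def pvGD (t : List String) : Option String :=
  if t.length = 3 ∧ PySem.List.pyGet? t 1 = some "dobj" then PySem.List.pyGet? t 2 else none

theorem pvShape3 (t : List String) (h : t.length = 3) : ∃ a b c, t = [a, b, c] := by
  rcases t with _ | ⟨a, _ | ⟨b, _ | ⟨c, _ | ⟨d, r⟩⟩⟩⟩ <;> simp_all

theorem pvFindSingle (f : List String → Option String) (t : List String) :
    List.findSome? f [t] = f t := by
  cases h : f t <;> simp [List.findSome?, h]

theorem pvStepA_fst (acc : Option String × Option String) (t : List String) :
    (pvStepA acc t).1 = (pvGV t).or acc.1 := by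
  by_cases h1 : t.length = 3
  · obtain ⟨a, b, c, rfl⟩ := pvShape3 t h1
    by_cases hb : b = "verb" <;> by_cases hb' : b = "dobj" <;> simp_all [pvStepA, pvGV]
  · simp [pvStepA, pvGV, h1]

theorem pvStepA_snd (acc : Option String × Option String) (t : List String) :
    (pvStepA acc t).2 = (pvGD t).or acc.2 := by
  by_cases h1 : t.length = 3
  · obtain ⟨a, b, c, rfl⟩ := pvShape3 t h1
    by_cases hb : b = "verb" <;> by_cases hb' : b = "dobj" <;> simp_all [pvStepA, pvGD]
  · simp [pvStepA, pvGD, h1]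

theorem pvFoldA (xs : List (List String)) :
    ∀ (v d : Option String),
      xs.foldl pvStepA (v, d) =
        ((xs.reverse.findSome? pvGV).or v, (xs.reverse.findSome? pvGD).or d) := by
  induction xs with
  | nil => intro v d; simp
  | cons t xs ih =>
    intro v d
    have hstep : pvStepA (v, d) t = ((pvGV t).or v, (pvGD t).or d) :=
      Prod.ext (pvStepA_fst (v, d) t) (pvStepA_snd (v, d) t)
    simp only [List.foldl_cons, hstep, ih, List.reverse_cons, List.findSome?_append,
      pvFindSingle]
    -- associate the three Option.or's
    simp [Option.or_assoc]

theorem pvGoB_eq (xs : List (List String)) :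
    ∀ (v d : Option String),
      pvGoB xs v d = (v.or (xs.findSome? pvGV), d.or (xs.findSome? pvGD)) := by
  induction xs with
  | nil => intro v d; simp [pvGoB]
  | cons t xs ih =>
    intro v d
    rw [pvGoB]
    -- identify the updated state with Option.or of the per-triplet contribution
    have hkey :
        (if t.length = 3 then
          if v = none ∧ PySem.List.pyGet? t 1 = some "verb" then (PySem.List.pyGet? t 2, d)
          else if d = none ∧ PySem.List.pyGet? t 1 = some "dobj" then (v, PySem.List.pyGet? t 2)
          else (v, d)
        else (v, d)) = (v.or (pvGV t), d.or (pvGD t)) := by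
      by_cases h1 : t.length = 3
      · obtain ⟨a, b, c, rfl⟩ := pvShape3 t h1
        rcases v with _ | x <;> rcases d with _ | y <;>
          by_cases hb : b = "verb" <;> by_cases hb' : b = "dobj" <;>
          simp_all [pvGV, pvGD]
      · simp [pvGV, pvGD, h1]
    rw [hkey]
    simp only
    by_cases hboth : v.or (pvGV t) ≠ none ∧ d.or (pvGD t) ≠ none
    · rw [if_pos hboth]
      obtain ⟨hv, hd⟩ := hboth
      refine Prod.ext ?_ ?_ <;> simp only [List.findSome?_cons]
      · cases hv' : v with
        | some y => simp
        | none =>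
          cases h : pvGV t <;> simp_all [Option.or]
      · cases hd' : d with
        | some y => simp
        | none =>
          cases h : pvGD t <;> simp_all [Option.or]
    · rw [if_neg hboth, ih]
      refine Prod.ext ?_ ?_ <;> simp only [List.findSome?_cons]
      · cases hv' : v with
        | some y => simp
        | none => cases h : pvGV t <;> simp_all [Option.or]
      · cases hd' : d with
        | some y => simp
        | none => cases h : pvGD t <;> simp_all [Option.or]

-- ===== VERDICT (by name: the statement is the Claim_ definition above) =====
theorem extract_verb_dobj_spec : Claim_equal_extract_verb_dobj := by
  intro triplets _
  unfold Spec_extract_verb_dobj extract_verb_dobj extract_verb_dobj_alt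
  rw [pvFoldA, pvGoB_eq]
  simp
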